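-- pv_equiv track=rewrite | github.com/Rafael8312/Search-JOBS | Search Engine.py | faixa_salario_brasil_por_cargo
-- ===== SOURCE A (Python) =====
-- def inferir_senioridade(texto):
--     t = (texto or "").lower()
--     if any(x in t for x in [" sr", "sênior", "senior", "lead", "principal", "especialista"]):
--         return "sr"
--     if any(x in t for x in [" pl", "pleno", "mid", "middle"]):
--         return "pl"
--     if any(x in t for x in [" jr", "júnior", "junior", "entry", "estágio", "intern"]):
--         return "jr"
--     return "pl"
--
-- def faixa_salario_brasil_por_cargo(titulo):
--     t = (titulo or "").lower()
--     senior = inferir_senioridade(titulo)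
--
--     if any(x in t for x in ["bi", "business intelligence", "power bi", "data analyst", "analista de dados"]):
--         if senior == "jr":
--             return "R$ 5.500 - R$ 8.000"
--         if senior == "sr":
--             return "R$ 11.500 - R$ 19.300"
--         return "R$ 8.500 - R$ 13.500"
--
--     if any(x in t for x in ["performance", "meta ads", "google ads", "tráfego", "trafego", "paid media"]):
--         if senior == "jr":
--             return "R$ 4.000 - R$ 7.000"
--         if senior == "sr":
--             return "R$ 10.000 - R$ 18.000"
--         return "R$ 7.000 - R$ 12.000"
--
--     if "python" in t and any(x in t for x in ["automation", "automação", "automatizacao", "automacao"]):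
--         if senior == "sr":
--             return "R$ 12.000 - R$ 22.000"
--         return "R$ 8.000 - R$ 16.000"
--
--     return "Não informado"
-- ===== SOURCE B (Python) =====
-- # One-pass min-rank scan over a flat keyword table, then a (category, seniority) salary-matrix lookup.
-- _FLAT = [
--     (" sr", "S", 0), ("s\u00eanior", "S", 0), ("senior", "S", 0), ("lead", "S", 0), ("principal", "S", 0), ("especialista", "S", 0),
--     (" pl", "S", 1), ("pleno", "S", 1), ("mid", "S", 1), ("middle", "S", 1),
--     (" jr", "S", 2), ("j\u00fanior", "S", 2), ("junior", "S", 2), ("entry", "S", 2), ("est\u00e1gio", "S", 2), ("intern", "S", 2),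
--     ("bi", "C", 0), ("business intelligence", "C", 0), ("power bi", "C", 0), ("data analyst", "C", 0), ("analista de dados", "C", 0),
--     ("performance", "C", 1), ("meta ads", "C", 1), ("google ads", "C", 1), ("tr\u00e1fego", "C", 1), ("trafego", "C", 1), ("paid media", "C", 1),
--     ("automation", "C", 2), ("automa\u00e7\u00e3o", "C", 2), ("automatizacao", "C", 2), ("automacao", "C", 2),
-- ]
--
-- _MATRIX = {
--     (0, 0): "R$ 11.500 - R$ 19.300", (0, 1): "R$ 8.500 - R$ 13.500", (0, 2): "R$ 5.500 - R$ 8.000",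
--     (1, 0): "R$ 10.000 - R$ 18.000", (1, 1): "R$ 7.000 - R$ 12.000", (1, 2): "R$ 4.000 - R$ 7.000",
--     (2, 0): "R$ 12.000 - R$ 22.000", (2, 1): "R$ 8.000 - R$ 16.000", (2, 2): "R$ 8.000 - R$ 16.000",
-- }
--
-- def faixa_salario_brasil_por_cargo(titulo):
--     t = (titulo or "").lower()
--     s_rank, c_rank = 3, 3
--     for kw, kind, r in _FLAT:
--         if kw in t:
--             if kind == "S":
--                 s_rank = min(s_rank, r)
--             else:
--                 c_rank = min(c_rank, r)
--     if c_rank == 2 and "python" not in t: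
--         c_rank = 3
--     if c_rank == 3:
--         return "N\u00e3o informado"
--     if s_rank == 3:
--         s_rank = 1
--     return _MATRIX[(c_rank, s_rank)]
-- ===== Notes on version B (the rewrite author's own statement) =====
-- stated objective: alternative
-- what changed: Replaces A's ordered short-circuit if-cascades by a single accumulator pass: one flat keyword table is scanned once keeping the minimum priority rank per axis (seniority, category), the python-requirement demotes category rank 2, and the answer comes from a (category, seniority) salary-matrix lookup.
import Mathlib
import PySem

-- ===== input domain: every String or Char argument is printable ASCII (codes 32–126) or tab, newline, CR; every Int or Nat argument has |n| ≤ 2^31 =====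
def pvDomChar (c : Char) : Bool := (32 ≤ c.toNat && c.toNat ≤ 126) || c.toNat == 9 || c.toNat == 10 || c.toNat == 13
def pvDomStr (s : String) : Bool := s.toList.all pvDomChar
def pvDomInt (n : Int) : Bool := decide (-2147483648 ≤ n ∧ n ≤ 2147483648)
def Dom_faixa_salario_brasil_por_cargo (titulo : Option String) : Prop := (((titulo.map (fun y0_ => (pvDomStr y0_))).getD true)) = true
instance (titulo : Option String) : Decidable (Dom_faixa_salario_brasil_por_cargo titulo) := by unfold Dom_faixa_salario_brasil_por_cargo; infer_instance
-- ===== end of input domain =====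

-- B replaces A's ordered if-cascades by one accumulator pass over a flat keyword table keeping
-- minimum priority ranks per axis, then a (category, seniority) salary-matrix lookup; same values.

-- ===== PORT A =====
def inferir_senioridade (texto : Option String) : String :=
  let t := PySem.Str.lower (texto.getD "")
  if ([" sr", "sênior", "senior", "lead", "principal", "especialista"].any (fun x => PySem.Str.isIn x t)) then "sr"
  else if ([" pl", "pleno", "mid", "middle"].any (fun x => PySem.Str.isIn x t)) then "pl"
  else if ([" jr", "júnior", "junior", "entry", "estágio", "intern"].any (fun x => PySem.Str.isIn x t)) then "jr"
  else "pl"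

def faixa_salario_brasil_por_cargo (titulo : Option String) : String :=
  let t := PySem.Str.lower (titulo.getD "")
  let senior := inferir_senioridade titulo
  if (["bi", "business intelligence", "power bi", "data analyst", "analista de dados"].any (fun x => PySem.Str.isIn x t)) then
    if senior == "jr" then "R$ 5.500 - R$ 8.000"
    else if senior == "sr" then "R$ 11.500 - R$ 19.300"
    else "R$ 8.500 - R$ 13.500"
  else if (["performance", "meta ads", "google ads", "tráfego", "trafego", "paid media"].any (fun x => PySem.Str.isIn x t)) then
    if senior == "jr" then "R$ 4.000 - R$ 7.000"
    else if senior == "sr" then "R$ 10.000 - R$ 18.000"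
    else "R$ 7.000 - R$ 12.000"
  else if (PySem.Str.isIn "python" t && (["automation", "automação", "automatizacao", "automacao"].any (fun x => PySem.Str.isIn x t))) then
    if senior == "sr" then "R$ 12.000 - R$ 22.000"
    else "R$ 8.000 - R$ 16.000"
  else "Não informado"

-- ===== PORT B =====
def pvFlatKw : List (String × String × Int) :=
  [(" sr", "S", 0), ("sênior", "S", 0), ("senior", "S", 0), ("lead", "S", 0), ("principal", "S", 0), ("especialista", "S", 0),
   (" pl", "S", 1), ("pleno", "S", 1), ("mid", "S", 1), ("middle", "S", 1),
   (" jr", "S", 2), ("júnior", "S", 2), ("junior", "S", 2), ("entry", "S", 2), ("estágio", "S", 2), ("intern", "S", 2),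
   ("bi", "C", 0), ("business intelligence", "C", 0), ("power bi", "C", 0), ("data analyst", "C", 0), ("analista de dados", "C", 0),
   ("performance", "C", 1), ("meta ads", "C", 1), ("google ads", "C", 1), ("tráfego", "C", 1), ("trafego", "C", 1), ("paid media", "C", 1),
   ("automation", "C", 2), ("automação", "C", 2), ("automatizacao", "C", 2), ("automacao", "C", 2)]

def pvMatrix : PySem.Dict (Int × Int) String :=
  PySem.Dict.ofList
    [((0, 0), "R$ 11.500 - R$ 19.300"), ((0, 1), "R$ 8.500 - R$ 13.500"), ((0, 2), "R$ 5.500 - R$ 8.000"),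
     ((1, 0), "R$ 10.000 - R$ 18.000"), ((1, 1), "R$ 7.000 - R$ 12.000"), ((1, 2), "R$ 4.000 - R$ 7.000"),
     ((2, 0), "R$ 12.000 - R$ 22.000"), ((2, 1), "R$ 8.000 - R$ 16.000"), ((2, 2), "R$ 8.000 - R$ 16.000")]

def pvStep (t : String) (st : Int × Int) (e : String × String × Int) : Int × Int :=
  if PySem.Str.isIn e.1 t then
    if e.2.1 == "S" then (min st.1 e.2.2, st.2) else (st.1, min st.2 e.2.2)
  else st

def faixa_salario_brasil_por_cargo_alt (titulo : Option String) : String :=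
  let t := PySem.Str.lower (titulo.getD "")
  let st := pvFlatKw.foldl (pvStep t) (3, 3)
  let c : Int := if st.2 == 2 && !(PySem.Str.isIn "python" t) then 3 else st.2
  if c == 3 then "Não informado"
  else
    let s : Int := if st.1 == 3 then 1 else st.1
    (pvMatrix.get? (c, s)).getD ""   -- KeyError impossible: (c, s) ∈ {0,1,2}² always present

-- ===== PRECONDITION & SPEC =====
def Spec_faixa_salario_brasil_por_cargo (titulo : Option String) (out : String) : Prop := out = faixa_salario_brasil_por_cargo_alt titulo
instance (titulo : Option String) (out : String) : Decidable (Spec_faixa_salario_brasil_por_cargo titulo out) := by unfold Spec_faixa_salario_brasil_por_cargo; infer_instance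

-- ===== CLAIM (what is proved, stated in full; the proofs are below) =====
def Claim_equal_faixa_salario_brasil_por_cargo : Prop := ∀ (titulo : Option String), Dom_faixa_salario_brasil_por_cargo titulo → Spec_faixa_salario_brasil_por_cargo titulo (faixa_salario_brasil_por_cargo titulo)

-- ===== LEMMAS AND PROOFS =====

-- folding a same-rank seniority keyword group = one min-update when any keyword matches
theorem pv_fold_group_S (t : String) (kws : List String) (r : Int) (st : Int × Int) :
    (kws.map (fun k => (k, "S", r))).foldl (pvStep t) st
      = if kws.any (fun k => PySem.Str.isIn k t) then (min st.1 r, st.2) else st := by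
  induction kws generalizing st with
  | nil => simp
  | cons h tl ih =>
    simp only [List.map_cons, List.foldl_cons, List.any_cons, pvStep]
    by_cases hm : PySem.Chars.isIn h.toList t.toList = true <;>
      simp [hm, ih, min_assoc, min_self]

-- same for a category keyword group
theorem pv_fold_group_C (t : String) (kws : List String) (r : Int) (st : Int × Int) :
    (kws.map (fun k => (k, "C", r))).foldl (pvStep t) st
      = if kws.any (fun k => PySem.Str.isIn k t) then (st.1, min st.2 r) else st := by
  induction kws generalizing st with
  | nil => simp
  | cons h tl ih =>
    simp only [List.map_cons, List.foldl_cons, List.any_cons, pvStep]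
    by_cases hm : PySem.Chars.isIn h.toList t.toList = true <;>
      simp [hm, ih, min_assoc, min_self]

theorem pvFlatKw_groups :
    pvFlatKw = ([" sr", "sênior", "senior", "lead", "principal", "especialista"].map (fun k => (k, "S", (0 : Int))))
      ++ ([" pl", "pleno", "mid", "middle"].map (fun k => (k, "S", (1 : Int))))
      ++ ([" jr", "júnior", "junior", "entry", "estágio", "intern"].map (fun k => (k, "S", (2 : Int))))
      ++ (["bi", "business intelligence", "power bi", "data analyst", "analista de dados"].map (fun k => (k, "C", (0 : Int))))
      ++ (["performance", "meta ads", "google ads", "tráfego", "trafego", "paid media"].map (fun k => (k, "C", (1 : Int))))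
      ++ (["automation", "automação", "automatizacao", "automacao"].map (fun k => (k, "C", (2 : Int)))) := by
  rfl

-- ===== VERDICT (by name: the statement is the Claim_ definition above) =====
theorem faixa_salario_brasil_por_cargo_spec : Claim_equal_faixa_salario_brasil_por_cargo := by
  intro titulo _
  unfold Spec_faixa_salario_brasil_por_cargo faixa_salario_brasil_por_cargo faixa_salario_brasil_por_cargo_alt inferir_senioridade
  rw [pvFlatKw_groups]
  simp only [List.foldl_append, pv_fold_group_S, pv_fold_group_C]
  simp only [List.any_cons, List.any_nil, Bool.or_false]
  generalize PySem.Str.lower (titulo.getD "") = t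
  generalize (PySem.Str.isIn " sr" t || (PySem.Str.isIn "sênior" t || (PySem.Str.isIn "senior" t || (PySem.Str.isIn "lead" t || (PySem.Str.isIn "principal" t || PySem.Str.isIn "especialista" t))))) = csr
  generalize (PySem.Str.isIn " pl" t || (PySem.Str.isIn "pleno" t || (PySem.Str.isIn "mid" t || PySem.Str.isIn "middle" t))) = cpl
  generalize (PySem.Str.isIn " jr" t || (PySem.Str.isIn "júnior" t || (PySem.Str.isIn "junior" t || (PySem.Str.isIn "entry" t || (PySem.Str.isIn "estágio" t || PySem.Str.isIn "intern" t))))) = cjr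
  generalize (PySem.Str.isIn "bi" t || (PySem.Str.isIn "business intelligence" t || (PySem.Str.isIn "power bi" t || (PySem.Str.isIn "data analyst" t || PySem.Str.isIn "analista de dados" t)))) = cbi
  generalize (PySem.Str.isIn "performance" t || (PySem.Str.isIn "meta ads" t || (PySem.Str.isIn "google ads" t || (PySem.Str.isIn "tráfego" t || (PySem.Str.isIn "trafego" t || PySem.Str.isIn "paid media" t))))) = cperf
  generalize (PySem.Str.isIn "automation" t || (PySem.Str.isIn "automação" t || (PySem.Str.isIn "automatizacao" t || PySem.Str.isIn "automacao" t))) = cauto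
  generalize PySem.Str.isIn "python" t = cpy
  revert csr cpl cjr cbi cperf cauto cpy
  decide
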